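-- pv_equiv track=rewrite | github.com/talkad/OMPify | CompCoder/eval/metrics.py | omp_valid_paren
-- ===== SOURCE A (Python) =====
-- def omp_valid_paren(pragma):
--     '''
--     Balanced non-canonical parentheses
--     '''
--     count = 0
--
--     for ch in pragma:
--         if count < 0 or count > 1:
--             return False
--
--         if ch == '(':
--             count += 1
--         elif ch == ')':
--             count -= 1
--
--     return count == 0
-- ===== SOURCE B (Python) =====
-- def omp_valid_paren(pragma):
--     p = ''.join(c for c in pragma if c == '(' or c == ')')
--     return p == '()' * (len(p) // 2)
-- ===== Notes on version B (the rewrite author's own statement) =====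
-- stated objective: simpler
-- what changed: Replaces the running-balance counter with its early-exit loop by filtering out the parenthesis subsequence and comparing it to the canonical alternating open-close pattern of length len/2 pairs.
import Mathlib
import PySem

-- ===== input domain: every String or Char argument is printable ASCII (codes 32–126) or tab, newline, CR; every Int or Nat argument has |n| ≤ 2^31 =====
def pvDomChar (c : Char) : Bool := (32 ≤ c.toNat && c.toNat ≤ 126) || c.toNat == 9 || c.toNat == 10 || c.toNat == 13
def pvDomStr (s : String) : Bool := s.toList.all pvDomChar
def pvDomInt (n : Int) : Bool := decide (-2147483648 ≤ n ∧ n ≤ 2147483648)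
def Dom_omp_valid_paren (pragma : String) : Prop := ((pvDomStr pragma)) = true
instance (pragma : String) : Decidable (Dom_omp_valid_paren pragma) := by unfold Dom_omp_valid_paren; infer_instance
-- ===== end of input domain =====

-- B filters the parenthesis subsequence and compares it to the canonical "()"*k pattern,
-- instead of A's running-balance counter with early exit; same values, same O(n) cost.

-- ===== PORT A =====
-- the for-loop over the characters with the running count and early returns
def ompLoopA : List Char → Int → Bool
  | [], count => count == 0
  | ch :: rest, count =>
    if count < 0 ∨ count > 1 then false
    else if ch = '(' then ompLoopA rest (count + 1)
    else if ch = ')' then ompLoopA rest (count - 1)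
    else ompLoopA rest count

def omp_valid_paren (pragma : String) : Bool := ompLoopA pragma.toList 0

-- ===== PORT B =====
-- '()' * k
def pvPat : Nat → List Char
  | 0 => []
  | k + 1 => '(' :: ')' :: pvPat k

def omp_valid_paren_alt (pragma : String) : Bool :=
  let p := pragma.toList.filter (fun c => c = '(' ∨ c = ')')
  p = pvPat (p.length / 2)

-- ===== PRECONDITION & SPEC =====
def Spec_omp_valid_paren (pragma : String) (out : Bool) : Prop := out = omp_valid_paren_alt pragma
instance (pragma : String) (out : Bool) : Decidable (Spec_omp_valid_paren pragma out) := by unfold Spec_omp_valid_paren; infer_instance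

-- ===== CLAIM (what is proved, stated in full; the proofs are below) =====
def Claim_equal_omp_valid_paren : Prop := ∀ (pragma : String), Dom_omp_valid_paren pragma → Spec_omp_valid_paren pragma (omp_valid_paren pragma)

-- ===== LEMMAS AND PROOFS =====

-- mutual characterisation of the filtered subsequence being "()"-pairs
mutual
def pvIsPairs : List Char → Bool
  | [] => true
  | '(' :: rest => pvIsClose rest
  | _ => false
def pvIsClose : List Char → Bool
  | ')' :: rest => pvIsPairs rest
  | _ => false
end

theorem ompLoopA_neg (l : List Char) : ompLoopA l (-1) = false := by
  cases l <;> simp [ompLoopA]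

theorem ompLoopA_two (l : List Char) : ompLoopA l 2 = false := by
  cases l <;> simp [ompLoopA]

theorem ompLoopA_pairs (l : List Char) :
    ompLoopA l 0 = pvIsPairs (l.filter (fun c => c = '(' ∨ c = ')')) ∧
    ompLoopA l 1 = pvIsClose (l.filter (fun c => c = '(' ∨ c = ')')) := by
  induction l with
  | nil => simp [ompLoopA, pvIsPairs, pvIsClose]
  | cons ch rest ih =>
    by_cases h1 : ch = '('
    · subst h1
      simp [ompLoopA, List.filter, pvIsPairs, pvIsClose, ih.2, ompLoopA_two]
    · by_cases h2 : ch = ')'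
      · subst h2
        simp [ompLoopA, List.filter, pvIsPairs, pvIsClose, ih.1, ompLoopA_neg]
      · simp [ompLoopA, List.filter, h1, h2, ih.1, ih.2]

theorem pairs_eq_pat (p : List Char) (h : ∀ c ∈ p, c = '(' ∨ c = ')') :
    pvIsPairs p = decide (p = pvPat (p.length / 2)) := by
  match p with
  | [] => simp [pvIsPairs, pvPat]
  | [c] =>
    rcases h c (by simp) with rfl | rfl <;> simp [pvIsPairs, pvIsClose, pvPat]
  | c1 :: c2 :: r =>
    have ih := pairs_eq_pat r (fun c hc => h c (by simp [hc]))
    have hlen : (r.length + 1 + 1) / 2 = r.length / 2 + 1 := by omega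
    rcases h c1 (by simp) with rfl | rfl <;> rcases h c2 (by simp) with rfl | rfl <;>
      simp [pvIsPairs, pvIsClose, hlen, pvPat, ih]
termination_by p.length

-- ===== VERDICT (by name: the statement is the Claim_ definition above) =====
theorem omp_valid_paren_spec : Claim_equal_omp_valid_paren := by
  intro pragma _
  show omp_valid_paren pragma = omp_valid_paren_alt pragma
  have h : ∀ c ∈ pragma.toList.filter (fun c => decide (c = '(' ∨ c = ')')), c = '(' ∨ c = ')' := by
    intro c hc; simpa using (List.mem_filter.mp hc).2
  show ompLoopA pragma.toList 0 = _
  rw [(ompLoopA_pairs pragma.toList).1, pairs_eq_pat _ h]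
  rfl
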